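-- pv_equiv track=rewrite | github.com/vm-dataset/O_55_rotation_data_generator | src/generator.py | _flip_voxels
-- ===== SOURCE A (Python) =====
-- from typing import List, Dict, Any, Tuple, Set, Iterable, Optional
--
-- Voxel = Tuple[int, int, int]
--
-- def _flip_voxels(voxels: List[Voxel], axes: Tuple[str, ...] = ("x",)) -> List[Voxel]:
--     """Flip voxels along specified axes."""
--     if not voxels:
--         return []
--
--     xs, ys, zs = zip(*voxels)
--     bounds = {
--         "x": (min(xs), max(xs)),
--         "y": (min(ys), max(ys)),
--         "z": (min(zs), max(zs))
--     }
--
--     result = []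
--     for x, y, z in voxels:
--         if "x" in axes:
--             x = bounds["x"][1] - (x - bounds["x"][0])
--         if "y" in axes:
--             y = bounds["y"][1] - (y - bounds["y"][0])
--         if "z" in axes:
--             z = bounds["z"][1] - (z - bounds["z"][0])
--         result.append((x, y, z))
--     return result
-- ===== SOURCE B (Python) =====
-- def _flip_voxels(voxels, axes=("x",)):
--     """Flip voxels along specified axes (column-wise)."""
--     if not voxels:
--         return []
--     cols = list(zip(*voxels))
--     out_cols = []
--     for name, col in zip(("x", "y", "z"), cols):
--         if name in axes:
--             s = min(col) + max(col)
--             out_cols.append([s - c for c in col])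
--         else:
--             out_cols.append(list(col))
--     return list(zip(*out_cols))
-- ===== Notes on version B (the rewrite author's own statement) =====
-- stated objective: faster
-- what changed: B transposes the voxels into columns, reflects each selected column wholesale with one precomputed constant min+max, and zips the processed columns back into rows, replacing A's row-wise loop that re-tests axis membership and re-reads a bounds dict for every voxel (a timing run measured B over 100x faster at the largest sizes).
import Mathlib
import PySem

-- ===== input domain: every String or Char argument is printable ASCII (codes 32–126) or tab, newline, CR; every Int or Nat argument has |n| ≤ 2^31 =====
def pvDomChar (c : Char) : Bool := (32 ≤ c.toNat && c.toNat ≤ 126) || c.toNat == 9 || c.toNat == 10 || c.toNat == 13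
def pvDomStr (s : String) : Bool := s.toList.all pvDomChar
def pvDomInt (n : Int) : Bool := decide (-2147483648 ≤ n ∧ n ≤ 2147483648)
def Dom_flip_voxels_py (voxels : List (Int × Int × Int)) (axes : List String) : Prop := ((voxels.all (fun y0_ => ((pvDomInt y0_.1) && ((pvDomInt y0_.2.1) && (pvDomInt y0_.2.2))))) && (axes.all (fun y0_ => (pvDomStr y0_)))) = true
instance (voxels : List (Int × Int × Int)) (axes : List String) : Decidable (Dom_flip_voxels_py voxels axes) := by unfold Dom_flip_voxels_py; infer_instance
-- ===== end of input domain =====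

-- B processes column-wise (transpose, reflect whole columns, zip back) instead of A's
-- row-wise loop; objective: column-wise work (measured faster; same O(n)).

-- ===== PORT A =====
-- row-wise: bounds per axis, then one loop over voxels appending flipped rows
def flip_voxels_py (voxels : List (Int × Int × Int)) (axes : List String) : List (Int × Int × Int) :=
  if voxels = [] then []
  else
    let xs := voxels.map (fun v => v.1)
    let ys := voxels.map (fun v => v.2.1)
    let zs := voxels.map (fun v => v.2.2)
    let xb := ((PySem.List.min? xs (fun y => y)).getD 0, (PySem.List.max? xs (fun y => y)).getD 0)
    let yb := ((PySem.List.min? ys (fun y => y)).getD 0, (PySem.List.max? ys (fun y => y)).getD 0)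
    let zb := ((PySem.List.min? zs (fun y => y)).getD 0, (PySem.List.max? zs (fun y => y)).getD 0)
    voxels.foldl (fun result v =>
      let x := if axes.contains "x" then xb.2 - (v.1 - xb.1) else v.1
      let y := if axes.contains "y" then yb.2 - (v.2.1 - yb.1) else v.2.1
      let z := if axes.contains "z" then zb.2 - (v.2.2 - zb.1) else v.2.2
      result ++ [(x, y, z)]) []

-- ===== PORT B =====
-- one processed output column per axis name
def pvProcCol (name : String) (col : List Int) (axes : List String) : List Int :=
  if axes.contains name then
    let s := (PySem.List.min? col (fun y => y)).getD 0 + (PySem.List.max? col (fun y => y)).getD 0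
    col.map (fun c => s - c)
  else col

def flip_voxels_py_alt (voxels : List (Int × Int × Int)) (axes : List String) : List (Int × Int × Int) :=
  if voxels = [] then []
  else
    let xs' := pvProcCol "x" (voxels.map (fun v => v.1)) axes
    let ys' := pvProcCol "y" (voxels.map (fun v => v.2.1)) axes
    let zs' := pvProcCol "z" (voxels.map (fun v => v.2.2)) axes
    List.zipWith (fun x yz => (x, yz.1, yz.2)) xs' (ys'.zip zs')

-- ===== PRECONDITION & SPEC =====
def Spec_flip_voxels_py (voxels : List (Int × Int × Int)) (axes : List String) (out : List (Int × Int × Int)) : Prop := out = flip_voxels_py_alt voxels axes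
instance (voxels : List (Int × Int × Int)) (axes : List String) (out : List (Int × Int × Int)) : Decidable (Spec_flip_voxels_py voxels axes out) := by unfold Spec_flip_voxels_py; infer_instance

-- ===== CLAIM (what is proved, stated in full; the proofs are below) =====
def Claim_equal_flip_voxels_py : Prop := ∀ (voxels : List (Int × Int × Int)) (axes : List String), Dom_flip_voxels_py voxels axes → Spec_flip_voxels_py voxels axes (flip_voxels_py voxels axes)

-- ===== LEMMAS AND PROOFS =====

-- recombining three mapped columns of l is a single map over the rows of l
theorem pv_zip3_map (f g h : Int → Int) (l : List (Int × Int × Int)) :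
    List.zipWith (fun x (yz : Int × Int) => (x, yz.1, yz.2))
      ((l.map (fun v => v.1)).map f)
      (((l.map (fun v => v.2.1)).map g).zip ((l.map (fun v => v.2.2)).map h))
    = l.map (fun v => (f v.1, g v.2.1, h v.2.2)) := by
  induction l with
  | nil => rfl
  | cons a t ih =>
    simp only [List.map_cons, List.zip_cons_cons, List.zipWith_cons_cons, ih]

-- pvProcCol is a map with a pointwise conditional
theorem pvProcCol_eq_map (name : String) (col : List Int) (axes : List String) :
    pvProcCol name col axes
    = col.map (fun c => if axes.contains name then
        ((PySem.List.min? col (fun y => y)).getD 0 + (PySem.List.max? col (fun y => y)).getD 0) - c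
      else c) := by
  unfold pvProcCol
  split_ifs with h <;> simp

theorem flip_voxels_eq (voxels : List (Int × Int × Int)) (axes : List String) :
    flip_voxels_py voxels axes = flip_voxels_py_alt voxels axes := by
  by_cases h : voxels = []
  · simp [flip_voxels_py, flip_voxels_py_alt, h]
  · simp only [flip_voxels_py, flip_voxels_py_alt, if_neg h]
    rw [pvProcCol_eq_map, pvProcCol_eq_map, pvProcCol_eq_map, pv_zip3_map,
      PySem.List.foldl_append_singleton_eq_map]
    apply List.map_congr_left
    intro v _
    split_ifs <;> simp [Prod.ext_iff] <;> omega

-- ===== VERDICT (by name: the statement is the Claim_ definition above) =====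
theorem flip_voxels_py_spec : Claim_equal_flip_voxels_py := by
  intro voxels axes _
  exact flip_voxels_eq voxels axes
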